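-- pv_equiv track=rewrite | github.com/cyal1/forbidden | src/forbidden.py | get_method_override_headers
-- ===== SOURCE A (Python) =====
-- def unique(sequence):
-- 	seen = set()
-- 	return [x for x in sequence if not (x in seen or seen.add(x))]
--
-- def get_method_override_headers(values):
-- 	tmp = []
-- 	for value in values:
-- 		tmp.extend([
-- 			("X-HTTP-Method: {0}").format(value),
-- 			("X-HTTP-Method-Override: {0}").format(value),
-- 			("X-Method-Override: {0}").format(value)
-- 		])
-- 	return unique(tmp)
-- ===== SOURCE B (Python) =====
-- def get_method_override_headers(values):
-- 	out = []
-- 	seen = set()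
-- 	for value in values:
-- 		key = "X-HTTP-Method: {0}".format(value)
-- 		if key not in seen:
-- 			seen.add(key)
-- 			out.append(key)
-- 			out.append("X-HTTP-Method-Override: {0}".format(value))
-- 			out.append("X-Method-Override: {0}".format(value))
-- 	return out
-- ===== Notes on version B (the rewrite author's own statement) =====
-- stated objective: simpler
-- what changed: A builds all three headers for every value and then runs a separate seen-set dedup pass over the whole 3n-header list; B fuses this into one pass that dedups values (keyed on the first formatted header, the string A actually hashes) and emits the three headers only for each new value, so the second pass disappears.
import Mathlib
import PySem

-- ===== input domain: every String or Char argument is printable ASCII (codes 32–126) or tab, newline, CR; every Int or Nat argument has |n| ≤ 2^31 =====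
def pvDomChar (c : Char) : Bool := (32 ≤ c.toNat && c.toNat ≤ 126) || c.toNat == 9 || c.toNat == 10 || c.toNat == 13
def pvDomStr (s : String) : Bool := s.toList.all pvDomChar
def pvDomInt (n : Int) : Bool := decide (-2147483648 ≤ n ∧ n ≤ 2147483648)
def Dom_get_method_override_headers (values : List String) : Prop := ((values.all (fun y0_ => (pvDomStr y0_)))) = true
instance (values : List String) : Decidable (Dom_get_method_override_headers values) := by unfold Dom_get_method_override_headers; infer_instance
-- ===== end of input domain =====

-- B fuses A's build-all-headers-then-dedup into a single pass that dedups the values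
-- (keyed on the first formatted header) and emits the three headers only for new values.

-- ===== PORT A =====
-- the three header formats (shared string constants of both programs)
def pvH1 (v : String) : String := "X-HTTP-Method: " ++ v
def pvH2 (v : String) : String := "X-HTTP-Method-Override: " ++ v
def pvH3 (v : String) : String := "X-Method-Override: " ++ v

-- unique(sequence): comprehension filtering with a seen set, as in the Python
def pvUniqueStep (p : List String × PySem.Set String) (x : String) :
    List String × PySem.Set String :=
  if PySem.Set.contains p.2 x then p else (p.1 ++ [x], PySem.Set.add p.2 x)

def pvUnique (sequence : List String) : List String :=
  (sequence.foldl pvUniqueStep ([], PySem.Set.empty)).1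

def get_method_override_headers (values : List String) : List String :=
  pvUnique (values.foldl (fun tmp value => tmp ++ [pvH1 value, pvH2 value, pvH3 value]) [])

-- ===== PORT B =====
-- one guarded-expand step: skip a value whose key header was seen, else emit all three
def pvAltStep (p : List String × PySem.Set String) (value : String) :
    List String × PySem.Set String :=
  if PySem.Set.contains p.2 (pvH1 value) then p
  else (p.1 ++ [pvH1 value, pvH2 value, pvH3 value], PySem.Set.add p.2 (pvH1 value))

def get_method_override_headers_alt (values : List String) : List String :=
  (values.foldl pvAltStep ([], PySem.Set.empty)).1

-- ===== PRECONDITION & SPEC =====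
def Spec_get_method_override_headers (values : List String) (out : List String) : Prop := out = get_method_override_headers_alt values
instance (values : List String) (out : List String) : Decidable (Spec_get_method_override_headers values out) := by unfold Spec_get_method_override_headers; infer_instance

-- ===== CLAIM (what is proved, stated in full; the proofs are below) =====
def Claim_equal_get_method_override_headers : Prop := ∀ (values : List String), Dom_get_method_override_headers values → Spec_get_method_override_headers values (get_method_override_headers values)

-- ===== LEMMAS AND PROOFS =====

-- injectivity of each header format
theorem pvH1_inj (v w : String) : pvH1 v = pvH1 w ↔ v = w := by
  constructor
  · intro h
    have h2 := congrArg String.toList h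
    simp [pvH1, String.toList_append] at h2
    exact String.toList_inj.mp h2
  · intro h; rw [h]

theorem pvH2_inj (v w : String) : pvH2 v = pvH2 w ↔ v = w := by
  constructor
  · intro h
    have h2 := congrArg String.toList h
    simp [pvH2, String.toList_append] at h2
    exact String.toList_inj.mp h2
  · intro h; rw [h]

theorem pvH3_inj (v w : String) : pvH3 v = pvH3 w ↔ v = w := by
  constructor
  · intro h
    have h2 := congrArg String.toList h
    simp [pvH3, String.toList_append] at h2
    exact String.toList_inj.mp h2
  · intro h; rw [h]

-- the three formats never collide across values (prefixes differ before the value starts)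
theorem pvH12_ne (v w : String) : pvH1 v ≠ pvH2 w := by
  intro h
  have h2 := congrArg String.toList h
  simp [pvH1, pvH2, String.toList_append] at h2

theorem pvH13_ne (v w : String) : pvH1 v ≠ pvH3 w := by
  intro h
  have h2 := congrArg String.toList h
  simp [pvH1, pvH3, String.toList_append] at h2

theorem pvH23_ne (v w : String) : pvH2 v ≠ pvH3 w := by
  intro h
  have h2 := congrArg String.toList h
  simp [pvH2, pvH3, String.toList_append] at h2

-- invariant relating A's seen set of headers to B's seen set of key headers
def pvInv (S T : PySem.Set String) : Prop :=
  ∀ w, (pvH1 w ∈ S ↔ pvH1 w ∈ T) ∧ (pvH2 w ∈ S ↔ pvH1 w ∈ T) ∧ (pvH3 w ∈ S ↔ pvH1 w ∈ T)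

theorem pvMain : ∀ (vs : List String) (acc : List String) (S T : PySem.Set String),
    pvInv S T →
    ((vs.flatMap (fun v => [pvH1 v, pvH2 v, pvH3 v])).foldl pvUniqueStep (acc, S)).1
      = (vs.foldl pvAltStep (acc, T)).1
  | [], acc, S, T, _ => rfl
  | v :: vs, acc, S, T, hInv => by
    rw [List.flatMap_cons, List.foldl_append]
    conv_rhs => rw [List.foldl_cons]
    by_cases hT : pvH1 v ∈ T
    · have h1S : pvH1 v ∈ S := ((hInv v).1).mpr hT
      have h2S : pvH2 v ∈ S := ((hInv v).2.1).mpr hT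
      have h3S : pvH3 v ∈ S := ((hInv v).2.2).mpr hT
      have hA : ([pvH1 v, pvH2 v, pvH3 v].foldl pvUniqueStep (acc, S)) = (acc, S) := by
        simp [pvUniqueStep, h1S, h2S, h3S]
      have hB : pvAltStep (acc, T) v = (acc, T) := by
        simp [pvAltStep, hT]
      rw [hA, hB]
      exact pvMain vs acc S T hInv
    · have h1S : pvH1 v ∉ S := fun h => hT (((hInv v).1).mp h)
      have h2S : pvH2 v ∉ S := fun h => hT (((hInv v).2.1).mp h)
      have h3S : pvH3 v ∉ S := fun h => hT (((hInv v).2.2).mp h)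
      have n21 : pvH2 v ≠ pvH1 v := fun h => pvH12_ne v v h.symm
      have n31 : pvH3 v ≠ pvH1 v := fun h => pvH13_ne v v h.symm
      have n32 : pvH3 v ≠ pvH2 v := fun h => pvH23_ne v v h.symm
      have hA : ([pvH1 v, pvH2 v, pvH3 v].foldl pvUniqueStep (acc, S))
          = (acc ++ [pvH1 v, pvH2 v, pvH3 v],
             ((S.add (pvH1 v)).add (pvH2 v)).add (pvH3 v)) := by
        simp [pvUniqueStep, h1S, h2S, h3S, n21, n31, n32]
      have hB : pvAltStep (acc, T) v
          = (acc ++ [pvH1 v, pvH2 v, pvH3 v], T.add (pvH1 v)) := by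
        simp [pvAltStep, hT]
      rw [hA, hB]
      apply pvMain
      intro w
      have m21 : pvH2 w ≠ pvH1 v := fun h => pvH12_ne v w h.symm
      have m31 : pvH3 w ≠ pvH1 v := fun h => pvH13_ne v w h.symm
      have m32 : pvH3 w ≠ pvH2 v := fun h => pvH23_ne v w h.symm
      refine ⟨?_, ?_, ?_⟩
      · simp only [PySem.Set.mem_add, pvH1_inj, pvH12_ne w v, pvH13_ne w v,
          (hInv w).1, or_false]
      · simp only [PySem.Set.mem_add, pvH2_inj, m21, pvH23_ne w v,
          (hInv w).2.1, or_false, pvH1_inj]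
      · simp only [PySem.Set.mem_add, pvH3_inj, m31, m32,
          (hInv w).2.2, or_false, pvH1_inj]

-- ===== VERDICT (by name: the statement is the Claim_ definition above) =====
theorem get_method_override_headers_spec : Claim_equal_get_method_override_headers := by
  intro values _
  unfold Spec_get_method_override_headers get_method_override_headers
    get_method_override_headers_alt pvUnique
  rw [PySem.List.foldl_append_eq_flatMap, List.nil_append]
  exact pvMain values [] PySem.Set.empty PySem.Set.empty
    (fun w => by simp [PySem.Set.empty])
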